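-- pv_equiv track=rewrite | github.com/giannisdaras/smyrf | smyrf/torch/utils.py | inversion_number
-- ===== SOURCE A (Python) =====
-- def inversion_number(arr1, arr2):
--     '''
--         Counts "relative" mistakes.
--     '''
--     mapping = {}
--     count = 0
--     not_found = 0
--
--     for i, elem in enumerate(arr2):
--         mapping[elem] = i
--
--     for i, elem_a in enumerate(arr1):
--         if not elem_a in mapping:
--             not_found += 1
--             count += len(arr1[i+1:])
--             continue
--
--         for elem_b in arr1[i+1:]:
--             mapped_a = mapping[elem_a]
--             if not elem_b in mapping:
--                 count += 1
--                 continue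
--             mapped_b = mapping[elem_b]
--             if mapped_a > mapped_b:
--                 count += 1
--     return count, not_found
-- ===== SOURCE B (Python) =====
-- def _merge_count(left, right):
--     """Merge two sorted lists, counting pairs (x in left, y in right) with x > y."""
--     merged = []
--     inv = 0
--     i = j = 0
--     while i < len(left) and j < len(right):
--         if left[i] <= right[j]:
--             merged.append(left[i])
--             i += 1
--         else:
--             inv += len(left) - i
--             merged.append(right[j])
--             j += 1
--     merged.extend(left[i:])
--     merged.extend(right[j:])
--     return merged, inv
--
--
-- def _sort_count(xs):
--     """Merge sort returning (sorted xs, number of inversions of xs)."""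
--     if len(xs) <= 1:
--         return list(xs), 0
--     mid = len(xs) // 2
--     sl, cl = _sort_count(xs[:mid])
--     sr, cr = _sort_count(xs[mid:])
--     merged, cm = _merge_count(sl, sr)
--     return merged, cl + cr + cm
--
--
-- def inversion_number(arr1, arr2):
--     mapping = {e: i for i, e in enumerate(arr2)}
--     n = len(arr1)
--     count = 0
--     not_found = 0
--     keys = []           # positions (in arr2) of the present elements, in arr1 order
--     for i, e in enumerate(arr1):
--         if e in mapping:
--             keys.append(mapping[e])
--         else:
--             # pairs with every later element, plus with every present earlier element
--             count += (n - 1 - i) + len(keys)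
--             not_found += 1
--     count += _sort_count(keys)[1]
--     return count, not_found
-- ===== Notes on version B (the rewrite author's own statement) =====
-- stated objective: faster
-- what changed: Replaces A's nested quadratic scan over suffixes by one linear pass that separates missing elements combinatorially plus a merge-sort inversion count over the mapped positions of the present elements.
import Mathlib
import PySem

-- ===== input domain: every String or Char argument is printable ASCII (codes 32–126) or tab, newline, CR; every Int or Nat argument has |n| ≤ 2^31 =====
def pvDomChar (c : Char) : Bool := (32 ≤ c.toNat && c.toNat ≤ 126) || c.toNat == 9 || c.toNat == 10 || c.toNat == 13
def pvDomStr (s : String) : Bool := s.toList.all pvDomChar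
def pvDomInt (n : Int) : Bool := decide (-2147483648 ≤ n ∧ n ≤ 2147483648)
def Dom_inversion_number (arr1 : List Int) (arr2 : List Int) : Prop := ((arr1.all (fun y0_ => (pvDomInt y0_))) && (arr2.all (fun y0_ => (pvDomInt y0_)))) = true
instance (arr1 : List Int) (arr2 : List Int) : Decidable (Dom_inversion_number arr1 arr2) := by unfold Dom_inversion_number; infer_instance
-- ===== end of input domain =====

-- B replaces A's nested quadratic scan by a single pass (missing elements counted
-- combinatorially) plus a merge-sort inversion count on mapped positions: objective 'faster'.

-- ===== PORT A =====
def inversion_number (arr1 : List Int) (arr2 : List Int) : List Int :=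
  -- mapping[elem] = i  for i, elem in enumerate(arr2)
  let mapping : PySem.Dict Int Int :=
    (PySem.List.enumerate arr2).foldl (fun m p => m.insert p.2 p.1) PySem.Dict.empty
  -- for i, elem_a in enumerate(arr1): … inner loop over arr1[i+1:]
  let st : Int × Int :=
    (PySem.List.enumerate arr1).foldl (fun (s : Int × Int) p =>
      if !(mapping.contains p.2) then
        (s.1 + ((PySem.List.slice arr1 (some (p.1 + 1)) none).length : Int), s.2 + 1)
      else
        ((PySem.List.slice arr1 (some (p.1 + 1)) none).foldl (fun c elem_b =>
            if !(mapping.contains elem_b) then c + 1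
            else if mapping.getD p.2 0 > mapping.getD elem_b 0 then c + 1 else c) s.1,
         s.2)) (0, 0)
  [st.1, st.2]

-- ===== PORT B =====
-- Source B's _merge_count : merge two sorted lists, counting pairs (x ∈ left, y ∈ right), x > y
def mergeCount : List Int → List Int → List Int × Int
  | [], right => (right, 0)
  | left, [] => (left, 0)
  | a :: l, b :: r =>
    if a ≤ b then
      let p := mergeCount l (b :: r); (a :: p.1, p.2)
    else
      let p := mergeCount (a :: l) r; (b :: p.1, p.2 + ((a :: l).length : Int))
termination_by l r => l.length + r.length

-- Source B's _sort_count : merge sort returning (sorted xs, inversion count of xs)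
def sortCount (xs : List Int) : List Int × Int :=
  if h : xs.length ≤ 1 then (xs, 0)
  else
    let mid := xs.length / 2
    let pl := sortCount (xs.take mid)
    let pr := sortCount (xs.drop mid)
    let pm := mergeCount pl.1 pr.1
    (pm.1, pl.2 + pr.2 + pm.2)
termination_by xs.length
decreasing_by
  · simp [List.length_take]; omega
  · simp [List.length_drop]; omega

def inversion_number_alt (arr1 : List Int) (arr2 : List Int) : List Int :=
  let mapping : PySem.Dict Int Int :=
    (PySem.List.enumerate arr2).foldl (fun m p => m.insert p.2 p.1) PySem.Dict.empty
  let n : Int := (arr1.length : Int)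
  -- one pass: (count, not_found, keys)
  let st : Int × Int × List Int :=
    (PySem.List.enumerate arr1).foldl (fun (s : Int × Int × List Int) p =>
      if mapping.contains p.2 then
        (s.1, s.2.1, s.2.2 ++ [mapping.getD p.2 0])
      else
        (s.1 + (n - 1 - p.1) + (s.2.2.length : Int), s.2.1 + 1, s.2.2)) (0, 0, [])
  [st.1 + (sortCount st.2.2).2, st.2.1]

-- ===== PRECONDITION & SPEC =====
def Spec_inversion_number (arr1 : List Int) (arr2 : List Int) (out : List Int) : Prop := out = inversion_number_alt arr1 arr2
instance (arr1 : List Int) (arr2 : List Int) (out : List Int) : Decidable (Spec_inversion_number arr1 arr2 out) := by unfold Spec_inversion_number; infer_instance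

-- ===== CLAIM (what is proved, stated in full; the proofs are below) =====
def Claim_equal_inversion_number : Prop := ∀ (arr1 : List Int) (arr2 : List Int), Dom_inversion_number arr1 arr2 → Spec_inversion_number arr1 arr2 (inversion_number arr1 arr2)

-- ===== LEMMAS AND PROOFS =====

-- abstractions over the (shared) mapping dict m
def pvPres (m : PySem.Dict Int Int) (x : Int) : Bool := m.contains x
def pvKey (m : PySem.Dict Int Int) (x : Int) : Int := m.getD x 0
-- predicate counted by A's inner loop at a fixed elem_a = a
def pvQA (m : PySem.Dict Int Int) (a y : Int) : Bool := !pvPres m y || decide (pvKey m y < pvKey m a)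
-- A's total count over a suffix
def pvFA (m : PySem.Dict Int Int) : List Int → Int
  | [] => 0
  | x :: xs =>
    (if pvPres m x then ((xs.countP (pvQA m x) : Int)) else ((xs.length : Int))) + pvFA m xs
-- B's missing-element count over a suffix, acc = number of present elements before
def pvGB (m : PySem.Dict Int Int) : List Int → Nat → Int
  | [], _ => 0
  | x :: xs, c =>
    if pvPres m x then pvGB m xs (c + 1) else ((xs.length : Int) + (c : Int)) + pvGB m xs c
def pvKeys (m : PySem.Dict Int Int) (l : List Int) : List Int :=
  (l.filter (fun x => pvPres m x)).map (fun x => pvKey m x)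
-- pairwise inversion count
def pvInv : List Int → Int
  | [] => 0
  | k :: ks => ((ks.countP (fun y => decide (y < k)) : Int)) + pvInv ks
-- cross inversions between two lists
def pvCross (l r : List Int) : Int :=
  (l.map (fun a => ((r.countP (fun y => decide (y < a))) : Int))).sum

lemma innerA (m : PySem.Dict Int Int) (a : Int) (l : List Int) :
    ∀ c : Int,
      (l.foldl (fun c elem_b =>
          if !(m.contains elem_b) then c + 1
          else if m.getD a 0 > m.getD elem_b 0 then c + 1 else c) c)
        = c + (l.countP (pvQA m a) : Int) := by
  induction l with
  | nil => simp
  | cons x xs ih =>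
    intro c
    simp only [List.foldl_cons, List.countP_cons]
    rw [ih]
    by_cases hc : m.contains x <;> by_cases hlt : m.getD a 0 > m.getD x 0 <;>
      simp [pvQA, pvPres, pvKey, hc, hlt] <;> push_cast <;> omega

lemma A_loop (m : PySem.Dict Int Int) :
    ∀ (suf pre : List Int) (c nf : Int),
      ((PySem.List.enumerate suf (pre.length : Int)).foldl (fun (s : Int × Int) p =>
        if !(m.contains p.2) then
          (s.1 + ((PySem.List.slice (pre ++ suf) (some (p.1 + 1)) none).length : Int), s.2 + 1)
        else
          ((PySem.List.slice (pre ++ suf) (some (p.1 + 1)) none).foldl (fun c elem_b =>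
              if !(m.contains elem_b) then c + 1
              else if m.getD p.2 0 > m.getD elem_b 0 then c + 1 else c) s.1,
           s.2)) (c, nf))
      = (c + pvFA m suf, nf + (suf.countP (fun x => !pvPres m x) : Int)) := by
  intro suf
  induction suf with
  | nil => intro pre c nf; simp [PySem.List.enumerate_nil, pvFA]
  | cons x xs ih =>
    intro pre c nf
    rw [PySem.List.enumerate_cons]
    simp only [List.foldl_cons]
    have hpre : pre ++ x :: xs = (pre ++ [x]) ++ xs := by simp
    have hslice : PySem.List.slice (pre ++ x :: xs) (some ((pre.length : Int) + 1)) none = xs := by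
      rw [show (pre.length : Int) + 1 = ((pre.length + 1 : Nat) : Int) from by push_cast; ring,
        PySem.List.slice_from_natCast, hpre]
      exact List.drop_left' (l₁ := pre ++ [x]) (by simp)
    have hstart : (pre.length : Int) + 1 = (((pre ++ [x]).length : Nat) : Int) := by
      simp
    by_cases hx : m.contains x
    · simp only [hx, Bool.not_true, Bool.false_eq_true, if_false, hslice]
      rw [innerA m x xs c, hstart, hpre, ih ((pre ++ [x])) _ nf]
      simp only [Prod.mk.injEq]
      refine ⟨?_, ?_⟩ <;> (try simp [pvFA, pvGB, pvKeys, pvPres, pvKey, hx, List.countP_cons]) <;> (try push_cast) <;> (try ring) <;> (try omega)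
    · simp only [hx, Bool.not_false, if_true, hslice]
      rw [hstart, hpre, ih ((pre ++ [x])) _ (nf + 1)]
      simp only [Prod.mk.injEq]
      refine ⟨?_, ?_⟩ <;> (try simp [pvFA, pvGB, pvKeys, pvPres, pvKey, hx, List.countP_cons]) <;> (try push_cast) <;> (try ring) <;> (try omega)

lemma B_loop (m : PySem.Dict Int Int) (n : Int) :
    ∀ (suf pre : List Int) (c nf : Int) (ks : List Int), n = ((pre ++ suf).length : Int) →
      ((PySem.List.enumerate suf (pre.length : Int)).foldl (fun (s : Int × Int × List Int) p =>
        if m.contains p.2 then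
          (s.1, s.2.1, s.2.2 ++ [m.getD p.2 0])
        else
          (s.1 + (n - 1 - p.1) + (s.2.2.length : Int), s.2.1 + 1, s.2.2)) (c, nf, ks))
      = (c + pvGB m suf ks.length,
         nf + (suf.countP (fun x => !pvPres m x) : Int),
         ks ++ pvKeys m suf) := by
  intro suf
  induction suf with
  | nil => intro pre c nf ks hn; simp [PySem.List.enumerate_nil, pvGB, pvKeys]
  | cons x xs ih =>
    intro pre c nf ks hn
    rw [PySem.List.enumerate_cons]
    simp only [List.foldl_cons]
    have hpre : pre ++ x :: xs = (pre ++ [x]) ++ xs := by simp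
    have hstart : (pre.length : Int) + 1 = (((pre ++ [x]).length : Nat) : Int) := by
      simp
    have hn' : n = (((pre ++ [x]) ++ xs).length : Int) := by rw [← hpre]; exact hn
    by_cases hx : m.contains x
    · simp only [hx, if_true]
      rw [hstart, ih ((pre ++ [x])) c nf (ks ++ [m.getD x 0]) hn']
      simp only [Prod.mk.injEq]
      refine ⟨?_, ?_, ?_⟩ <;> (try simp [pvGB, pvKeys, pvPres, pvKey, hx, List.countP_cons]) <;> (try push_cast) <;> (try ring) <;> (try omega)
    · simp only [hx, Bool.false_eq_true, if_false]
      have hlen : n - 1 - (pre.length : Int) = (xs.length : Int) := by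
        rw [hn]; simp; push_cast; ring
      rw [hstart, ih ((pre ++ [x])) _ (nf + 1) ks hn', hlen]
      simp only [Prod.mk.injEq]
      refine ⟨?_, ?_, ?_⟩ <;> (try simp [pvGB, pvKeys, pvPres, pvKey, hx, List.countP_cons]) <;> (try push_cast) <;> (try ring) <;> (try omega)

lemma countP_or_split (p q : Int → Bool) (l : List Int) :
    l.countP (fun y => p y || q y) = l.countP p + l.countP (fun y => !p y && q y) := by
  induction l with
  | nil => simp
  | cons x xs ih =>
    simp only [List.countP_cons]
    cases hp : p x <;> cases hq : q x <;> simp [hp, hq, ih] <;> omega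

lemma GB_shift (m : PySem.Dict Int Int) (l : List Int) :
    ∀ c : Nat, pvGB m l c = pvGB m l 0 + (c : Int) * (l.countP (fun x => !pvPres m x) : Int) := by
  induction l with
  | nil => simp [pvGB]
  | cons x xs ih =>
    intro c
    by_cases hx : pvPres m x
    · simp only [pvGB, hx, if_pos, List.countP_cons]
      rw [ih (c + 1), ih 1]
      simp [hx]
      push_cast
      ring
    · simp only [pvGB, hx, if_neg, List.countP_cons]
      rw [ih c, ih 0]
      simp [hx]
      push_cast
      ring

lemma FA_eq (m : PySem.Dict Int Int) (l : List Int) :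
    pvFA m l = pvInv (pvKeys m l) + pvGB m l 0 := by
  induction l with
  | nil => simp [pvFA, pvKeys, pvInv, pvGB]
  | cons x xs ih =>
    by_cases hx : pvPres m x
    · have hsplit := countP_or_split (fun y => !pvPres m y)
        (fun y => decide (pvKey m y < pvKey m x)) xs
      have hkeys : pvKeys m (x :: xs) = pvKey m x :: pvKeys m xs := by
        simp [pvKeys, hx]
      have hcnt : (pvKeys m xs).countP (fun y => decide (y < pvKey m x))
          = xs.countP (fun y => !(!pvPres m y) && decide (pvKey m y < pvKey m x)) := by
        simp only [pvKeys, List.countP_map, List.countP_filter]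
        apply List.countP_congr
        intro y _
        cases hy : pvPres m y <;> simp [Function.comp, hy]
      have hGB : pvGB m (x :: xs) 0 = pvGB m xs 0 + (xs.countP (fun y => !pvPres m y) : Int) := by
        simp only [pvGB, hx, if_pos]
        rw [GB_shift m xs 1]
        push_cast
        ring
      have hq : List.countP (pvQA m x) xs
          = xs.countP (fun y => !pvPres m y || decide (pvKey m y < pvKey m x)) := by
        apply List.countP_congr
        intro y _
        simp [pvQA]
      simp only [pvFA, hx, if_pos, hkeys, pvInv, hq, hsplit, hcnt, hGB, ih]
      push_cast
      ring
    · have hkeys : pvKeys m (x :: xs) = pvKeys m xs := by simp [pvKeys, hx]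
      simp only [pvFA, hx, if_neg, Bool.false_eq_true, hkeys, pvGB, ih]
      push_cast
      ring

lemma inv_append (l r : List Int) : pvInv (l ++ r) = pvInv l + pvInv r + pvCross l r := by
  induction l with
  | nil => simp [pvInv, pvCross]
  | cons x xs ih =>
    simp only [List.cons_append, pvInv, pvCross, List.map_cons, List.sum_cons,
      List.countP_append] at *
    rw [ih]
    push_cast
    ring

lemma cross_nil_right (l : List Int) : pvCross l [] = 0 := by
  induction l with
  | nil => simp [pvCross]
  | cons x xs ih => simpa [pvCross] using ih

lemma cross_cons_right (l : List Int) (b : Int) (r : List Int) (h : ∀ x ∈ l, b < x) :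
    pvCross l (b :: r) = (l.length : Int) + pvCross l r := by
  induction l with
  | nil => simp [pvCross]
  | cons x xs ih =>
    have hx : b < x := h x (by simp)
    simp only [pvCross, List.map_cons, List.sum_cons, List.countP_cons, List.length_cons] at *
    rw [ih (fun y hy => h y (by simp [hy]))]
    simp [hx]
    push_cast
    ring

lemma cross_perm (l l' r r' : List Int) (hl : l.Perm l') (hr : r.Perm r') :
    pvCross l r = pvCross l' r' := by
  unfold pvCross
  have hfun : ∀ a : Int, ((r.countP (fun y => decide (y < a))) : Int)
      = ((r'.countP (fun y => decide (y < a))) : Int) := by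
    intro a; rw [hr.countP_eq]
  calc (l.map (fun a => ((r.countP (fun y => decide (y < a))) : Int))).sum
      = (l.map (fun a => ((r'.countP (fun y => decide (y < a))) : Int))).sum := by
        congr 1; exact List.map_congr_left (fun a _ => hfun a)
    _ = (l'.map (fun a => ((r'.countP (fun y => decide (y < a))) : Int))).sum :=
        (hl.map _).sum_eq

lemma merge_perm (l r : List Int) : (mergeCount l r).1.Perm (l ++ r) := by
  induction l, r using mergeCount.induct with
  | case1 r => simp [mergeCount]
  | case2 l h =>
    cases l with
    | nil => exact absurd rfl h
    | cons a t => simp [mergeCount]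
  | case3 a l b r hab ih =>
    simp only [mergeCount, if_pos hab]
    exact (ih.cons a)
  | case4 a l b r hab ih =>
    simp only [mergeCount, if_neg hab]
    exact (ih.cons b).trans List.perm_middle.symm

lemma merge_sorted (l r : List Int) (hl : l.Pairwise (· ≤ ·)) (hr : r.Pairwise (· ≤ ·)) :
    (mergeCount l r).1.Pairwise (· ≤ ·) := by
  induction l, r using mergeCount.induct with
  | case1 r => simpa [mergeCount] using hr
  | case2 l h =>
    cases l with
    | nil => exact absurd rfl h
    | cons a t => simpa [mergeCount] using hl
  | case3 a l b r hab ih =>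
    simp only [mergeCount, if_pos hab]
    rw [List.pairwise_cons]
    refine ⟨?_, ih (List.pairwise_cons.mp hl).2 hr⟩
    intro y hy
    rcases (merge_perm l (b :: r)).mem_iff.mp hy with hmem
    rcases List.mem_append.mp hmem with h1 | h2
    · exact (List.pairwise_cons.mp hl).1 y h1
    · rcases List.mem_cons.mp h2 with rfl | h3
      · exact hab
      · exact le_trans hab ((List.pairwise_cons.mp hr).1 y h3)
  | case4 a l b r hab ih =>
    simp only [mergeCount, if_neg hab]
    rw [List.pairwise_cons]
    refine ⟨?_, ih hl (List.pairwise_cons.mp hr).2⟩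
    intro y hy
    have hba : b ≤ a := le_of_lt (lt_of_not_ge hab)
    rcases List.mem_append.mp ((merge_perm (a :: l) r).mem_iff.mp hy) with h1 | h2
    · rcases List.mem_cons.mp h1 with rfl | h3
      · exact hba
      · exact le_trans hba ((List.pairwise_cons.mp hl).1 y h3)
    · exact (List.pairwise_cons.mp hr).1 y h2

lemma merge_cross (l r : List Int) (hl : l.Pairwise (· ≤ ·)) (hr : r.Pairwise (· ≤ ·)) :
    (mergeCount l r).2 = pvCross l r := by
  induction l, r using mergeCount.induct with
  | case1 r => simp [mergeCount, pvCross]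
  | case2 l h =>
    cases l with
    | nil => exact absurd rfl h
    | cons a t => simp [mergeCount, cross_nil_right]
  | case3 a l b r hab ih =>
    simp only [mergeCount, if_pos hab]
    have h0 : (b :: r).countP (fun y => decide (y < a)) = 0 := by
      rw [List.countP_eq_zero]
      intro y hy
      rcases List.mem_cons.mp hy with rfl | h3
      · simpa using not_lt.mpr hab
      · simpa using not_lt.mpr (le_trans hab ((List.pairwise_cons.mp hr).1 y h3))
    have := ih (List.pairwise_cons.mp hl).2 hr
    simp only [pvCross, List.map_cons, List.sum_cons] at *
    rw [this, h0]
    simp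
  | case4 a l b r hab ih =>
    simp only [mergeCount, if_neg hab]
    have hba : b < a := lt_of_not_ge hab
    have hbl : ∀ x ∈ a :: l, b < x := by
      intro x hx
      rcases List.mem_cons.mp hx with rfl | h3
      · exact hba
      · exact lt_of_lt_of_le hba ((List.pairwise_cons.mp hl).1 x h3)
    rw [ih hl (List.pairwise_cons.mp hr).2, cross_cons_right (a :: l) b r hbl]
    ring

lemma sortCount_eq (xs : List Int) (h : ¬ xs.length ≤ 1) :
    sortCount xs =
      ((mergeCount (sortCount (xs.take (xs.length / 2))).1 (sortCount (xs.drop (xs.length / 2))).1).1,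
       (sortCount (xs.take (xs.length / 2))).2 + (sortCount (xs.drop (xs.length / 2))).2
         + (mergeCount (sortCount (xs.take (xs.length / 2))).1 (sortCount (xs.drop (xs.length / 2))).1).2) := by
  rw [sortCount]
  simp [h]

lemma sortCount_spec_aux : ∀ (n : Nat) (xs : List Int), xs.length ≤ n →
    (sortCount xs).1.Pairwise (· ≤ ·) ∧ (sortCount xs).1.Perm xs ∧ (sortCount xs).2 = pvInv xs := by
  intro n
  induction n with
  | zero =>
    intro xs hlen
    have : xs = [] := List.length_eq_zero_iff.mp (Nat.le_zero.mp hlen)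
    subst this
    rw [sortCount]
    simp [pvInv]
  | succ n ih =>
    intro xs hlen
    by_cases h : xs.length ≤ 1
    · rw [sortCount]
      simp only [if_pos h]
      cases xs with
      | nil => simp [pvInv]
      | cons x t =>
        cases t with
        | nil => simp [pvInv]
        | cons y u => simp at h
    · obtain ⟨sl1, pl1, il1⟩ := ih (xs.take (xs.length / 2))
        (by simp [List.length_take]; omega)
      obtain ⟨sl2, pl2, il2⟩ := ih (xs.drop (xs.length / 2))
        (by simp [List.length_drop]; omega)
      rw [sortCount_eq xs h]
      have hperm : ((sortCount (xs.take (xs.length / 2))).1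
          ++ (sortCount (xs.drop (xs.length / 2))).1).Perm xs := by
        have hp := pl1.append pl2
        rwa [List.take_append_drop] at hp
      refine ⟨?_, ?_, ?_⟩
      · exact merge_sorted _ _ sl1 sl2
      · exact (merge_perm _ _).trans hperm
      · have hm := merge_cross _ _ sl1 sl2
        have hinv : pvInv xs = pvInv (xs.take (xs.length / 2)) + pvInv (xs.drop (xs.length / 2))
            + pvCross (xs.take (xs.length / 2)) (xs.drop (xs.length / 2)) := by
          conv_lhs => rw [← List.take_append_drop (xs.length / 2) xs]
          exact inv_append _ _
        simp only [hm, cross_perm _ _ _ _ pl1 pl2, il1, il2, hinv]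

lemma sortCount_inv (xs : List Int) : (sortCount xs).2 = pvInv xs :=
  (sortCount_spec_aux xs.length xs le_rfl).2.2

-- ===== VERDICT (by name: the statement is the Claim_ definition above) =====
theorem inversion_number_spec : Claim_equal_inversion_number := by
  intro arr1 arr2 _
  unfold Spec_inversion_number inversion_number inversion_number_alt
  have hA := A_loop ((PySem.List.enumerate arr2).foldl (fun m p => m.insert p.2 p.1)
    PySem.Dict.empty) arr1 [] 0 0
  have hB := B_loop ((PySem.List.enumerate arr2).foldl (fun m p => m.insert p.2 p.1)
    PySem.Dict.empty) ((arr1.length : Int)) arr1 [] 0 0 [] (by simp)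
  simp only [List.nil_append, List.length_nil, Nat.cast_zero] at hA hB
  simp only [hA, hB, sortCount_inv, FA_eq]
  simp only [List.cons.injEq, and_true]
  ring
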